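-- pv_equiv track=rewrite | github.com/mikez321/practice_projects | other_challenges/python/first_word.py | first_word
-- ===== SOURCE A (Python) =====
-- def first_word(text: str) -> str:
--     """
--     Return the first word of a given string.
--
--     :param text: Any string of text.
--     :return: The first word in that string of text is returned. If there is an
--         apostrophe and it is part of the word it should be included.  Erroneous
--         punctuation before or after a word should be removed.
--     """
--     first_word = None
--
--     for word in text.split():
--         if word[0].isalpha():
--             first_word = list(word)
--             break
--
--     for index, char in enumerate(first_word):
--         if char.isalpha() or char == "'":
--             continue
--         else:
--             first_word = first_word[:index]
--
--     for index, char in enumerate(first_word):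
--         if char.isalpha():
--             first_word = first_word[index:]
--             break
--
--     indexes = len(first_word)
--
--     for index in reversed(range(0, indexes)):
--         if first_word[index].isalpha() is False:
--             del first_word[index]
--
--     return "".join(first_word)
-- ===== SOURCE B (Python) =====
-- def first_word(text: str) -> str:
--     word = next((w for w in text.split() if w[0].isalpha()), None)
--     cut = min((i for i, c in enumerate(word) if not c.isalpha() and c != "'"),
--               default=len(word))
--     return "".join(c for c in word[:cut] if c.isalpha())
-- ===== Notes on version B (the rewrite author's own statement) =====
-- stated objective: simpler
-- what changed: A's three list-rebinding/mutating clean-up loops (repeated slicing inside an enumerate over the original list, a no-op realignment loop, and a reversed in-place deletion loop) are replaced by computing one cut index (the minimum position of a character that is neither a letter nor an apostrophe, defaulting to the word length) and filtering the letters of that single slice.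
import Mathlib
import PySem

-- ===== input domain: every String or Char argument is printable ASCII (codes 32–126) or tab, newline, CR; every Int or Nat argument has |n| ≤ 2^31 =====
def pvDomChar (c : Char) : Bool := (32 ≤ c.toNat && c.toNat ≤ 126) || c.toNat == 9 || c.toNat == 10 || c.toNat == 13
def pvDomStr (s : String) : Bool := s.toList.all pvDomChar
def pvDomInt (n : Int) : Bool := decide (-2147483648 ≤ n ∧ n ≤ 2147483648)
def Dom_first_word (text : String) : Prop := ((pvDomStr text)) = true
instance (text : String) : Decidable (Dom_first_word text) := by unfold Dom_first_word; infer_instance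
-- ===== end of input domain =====

-- B replaces A's three list-rebinding/mutating clean-up loops by computing the single cut index
-- (min non-letter non-apostrophe position) and filtering one slice; same return value on Pre_.

-- ===== PORT A =====
-- first loop of A: find the first whitespace token whose first character is a letter
-- (w[0]: split₀ tokens are nonempty, so headD's default ' ' (non-alphabetic) is never consulted)
def pvFindTokA : List String → Option (List Char)
  | [] => none
  | w :: rest =>
    if PySem.Chars.isalpha (w.toList.headD ' ') then some w.toList else pvFindTokA rest

-- third loop of A: on the first alphabetic character at index i, first_word = first_word[i:] and break
def pvLoop3 (fw : List Char) : List (Int × Char) → List Char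
  | [] => fw
  | (i, c) :: rest =>
    if PySem.Chars.isalpha c then PySem.List.slice fw (some i) none else pvLoop3 fw rest

def first_word (text : String) : String :=
  match pvFindTokA (PySem.Str.split₀ text) with
  | none => ""   -- Python raises TypeError here (first_word is None); excluded by Pre_first_word
  | some fw0 =>
    -- second loop: enumerate iterates the ORIGINAL list while first_word is rebound to a slice
    let fw1 := (PySem.List.enumerate fw0).foldl
      (fun cur ic => if PySem.Chars.isalpha ic.2 || ic.2 == '\'' then cur
                     else PySem.List.slice cur none (some ic.1)) fw0
    let fw2 := pvLoop3 fw1 (PySem.List.enumerate fw1)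
    -- fourth loop: for index in reversed(range(0, len)): del first_word[index] if not alpha
    -- (del cur[i] = cur.eraseIdx i.toNat, exact since every visited i satisfies 0 ≤ i < len cur)
    let fw3 := (PySem.List.pyRange 0 (PySem.List.len fw2) 1).reverse.foldl
      (fun cur i => if PySem.Chars.isalpha (PySem.List.pyGetD cur i ' ') = false
                    then cur.eraseIdx i.toNat else cur) fw2
    String.ofList fw3

-- ===== PORT B =====
def pvFindTokB : List String → Option String
  | [] => none
  | w :: rest =>
    if PySem.Chars.isalpha (w.toList.headD ' ') then some w else pvFindTokB rest

def first_word_alt (text : String) : String :=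
  match pvFindTokB (PySem.Str.split₀ text) with
  | none => ""   -- Python raises TypeError here (enumerate(None)); excluded by Pre_first_word
  | some w =>
    let cs := w.toList
    let cut := PySem.List.minD
      (((PySem.List.enumerate cs).filter
          (fun ic => !(PySem.Chars.isalpha ic.2) && !(ic.2 == '\''))).map (·.1))
      (fun i => i) (PySem.List.len cs)
    String.ofList ((PySem.List.slice cs none (some cut)).filter (fun c => PySem.Chars.isalpha c))

-- ===== PRECONDITION & SPEC =====
-- Pre_ excludes exactly the inputs on which the Python A raises TypeError: texts with no
-- whitespace token starting with a letter (there first_word stays None and enumerate(None) raises).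
def Pre_first_word (text : String) : Prop :=
  ∃ w ∈ PySem.Str.split₀ text, PySem.Chars.isalpha (w.toList.headD ' ') = true
instance (text : String) : Decidable (Pre_first_word text) := by unfold Pre_first_word; infer_instance

def pvWitness_first_word : String := "hello world"

def Spec_first_word (text : String) (out : String) : Prop := out = first_word_alt text
instance (text : String) (out : String) : Decidable (Spec_first_word text out) := by unfold Spec_first_word; infer_instance

-- ===== CLAIM (what is proved, stated in full; the proofs are below) =====
def Claim_equal_first_word : Prop := ∀ (text : String), Dom_first_word text → Pre_first_word text → Spec_first_word text (first_word text)

-- ===== LEMMAS AND PROOFS =====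

-- the "cut here" character class: neither a letter nor an apostrophe
def pvBad (c : Char) : Bool := !(PySem.Chars.isalpha c) && !(c == '\'')

lemma pvTok_rel (ts : List String) : pvFindTokA ts = (pvFindTokB ts).map String.toList := by
  induction ts with
  | nil => rfl
  | cons w rest ih => simp only [pvFindTokA, pvFindTokB]; split <;> simp [ih]

lemma pvTokB_eq_none (ts : List String) :
    pvFindTokB ts = none ↔ ∀ w ∈ ts, PySem.Chars.isalpha (w.toList.headD ' ') = false := by
  induction ts with
  | nil => simp [pvFindTokB]
  | cons w rest ih =>
    simp only [pvFindTokB]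
    split <;> simp_all

lemma pvTokB_alpha {ts : List String} {w : String} (h : pvFindTokB ts = some w) :
    PySem.Chars.isalpha (w.toList.headD ' ') = true := by
  induction ts with
  | nil => simp [pvFindTokB] at h
  | cons v rest ih =>
    simp only [pvFindTokB] at h
    split at h
    · cases h; assumption
    · exact ih h

-- loop 2, stability: once first_word has been cut to length ≤ every remaining index,
-- the remaining iterations change nothing
lemma pvLoop2_stable (ps : List (Int × Char)) (cur : List Char)
    (h : ∀ p ∈ ps, (cur.length : Int) ≤ p.1) :
    ps.foldl (fun cur ic => if PySem.Chars.isalpha ic.2 || ic.2 == '\'' then cur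
                            else PySem.List.slice cur none (some ic.1)) cur = cur := by
  induction ps with
  | nil => rfl
  | cons p ps ih =>
    have hp := h p (by simp)
    have h0 : (0:Int) ≤ p.1 := le_trans (by positivity) hp
    simp only [List.foldl_cons]
    split
    · exact ih (fun q hq => h q (by simp [hq]))
    · rw [PySem.List.slice_to _ h0, List.take_of_length_le (by omega)]
      exact ih (fun q hq => h q (by simp [hq]))

-- loop 2: A's second loop truncates first_word at its FIRST character that is neither
-- a letter nor an apostrophe (later slices first_word[:index] no longer shrink it)
lemma pvLoop2_main (l : List Char) : ∀ (pre : List Char),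
    (PySem.List.enumerate l (pre.length : Int)).foldl
      (fun cur ic => if PySem.Chars.isalpha ic.2 || ic.2 == '\'' then cur
                     else PySem.List.slice cur none (some ic.1)) (pre ++ l)
    = pre ++ l.take (l.findIdx pvBad) := by
  induction l with
  | nil => intro pre; simp [PySem.List.enumerate]
  | cons c t ih =>
    intro pre
    rw [PySem.List.enumerate_cons]
    simp only [List.foldl_cons]
    split
    · -- the character is kept: a letter or an apostrophe
      rename_i hcond
      have hb : pvBad c = false := by
        simp only [pvBad]
        simp only [Bool.or_eq_true] at hcond
        rcases hcond with h | h <;> simp [h]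
      have hre : pre ++ c :: t = (pre ++ [c]) ++ t := by simp
      have hlen : (pre.length : Int) + 1 = ((pre ++ [c]).length : Int) := by
        simp
      rw [hre, hlen, ih (pre ++ [c])]
      rw [List.findIdx_cons, hb]
      simp [List.take_succ_cons]
    · -- first bad character: first_word becomes pre, all later indices exceed its length
      rename_i hcond
      have hb : pvBad c = true := by
        simp only [pvBad]
        simp only [Bool.or_eq_true, not_or] at hcond
        simp_all
      rw [PySem.List.slice_to _ (by positivity), Int.toNat_natCast, List.take_left]
      rw [pvLoop2_stable _ _ ?_]
      · rw [List.findIdx_cons, hb]; simp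
      · intro p hp
        rw [PySem.List.mem_enumerate_iff] at hp
        obtain ⟨k, hk, rfl⟩ := hp
        simp; omega

-- loop 3 is the identity: the list is empty or still starts with the token's alphabetic head
lemma pvLoop3_id (l : List Char)
    (h : l = [] ∨ ∃ c t, l = c :: t ∧ PySem.Chars.isalpha c = true) :
    pvLoop3 l (PySem.List.enumerate l) = l := by
  rcases h with rfl | ⟨c, t, rfl, hc⟩
  · rfl
  · rw [PySem.List.enumerate_cons]
    simp only [pvLoop3, hc, if_true]
    simp [PySem.List.slice_zero_start, PySem.List.slice_none_none]

-- loop 4: deleting every non-letter, right to left, is filtering the letters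
lemma pvLoop4_aux : ∀ (k : Nat) (l : List Char), k ≤ l.length →
    ((PySem.List.pyRange 0 (k : Int) 1).reverse).foldl
      (fun cur i => if PySem.Chars.isalpha (PySem.List.pyGetD cur i ' ') = false
                    then cur.eraseIdx i.toNat else cur) l
    = (l.take k).filter PySem.Chars.isalpha ++ l.drop k := by
  intro k
  induction k with
  | zero => intro l _; simp [PySem.List.pyRange]
  | succ k ih =>
    intro l hk
    have hsplit : PySem.List.pyRange 0 ((k:Int) + 1) 1
        = PySem.List.pyRange 0 (k:Int) 1 ++ [(k:Int)] := by
      rw [PySem.List.pyRange_one_succ_right]; omega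
    have hcast : ((k + 1 : Nat) : Int) = (k : Int) + 1 := by push_cast; ring
    rw [hcast, hsplit, List.reverse_append]
    simp only [List.reverse_singleton, List.singleton_append, List.foldl_cons]
    have hklt : k < l.length := by omega
    have hget : PySem.List.pyGetD l (k : Int) ' ' = l[k] := by
      rw [PySem.List.pyGetD_natCast, List.getD_eq_getElem?_getD, List.getElem?_eq_getElem hklt]
      rfl
    rw [hget]
    have hsucc : l.take (k + 1) = l.take k ++ [l[k]] := by
      rw [List.take_add_one, List.getElem?_eq_getElem hklt]; rfl
    by_cases ha : PySem.Chars.isalpha l[k] = true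
    · simp only [ha, Bool.true_eq_false, if_false]
      rw [ih l (by omega)]
      rw [hsucc, List.filter_append, List.drop_eq_getElem_cons hklt]
      simp [ha]
    · simp only [Bool.not_eq_true] at ha
      simp only [ha, if_true, Int.toNat_natCast]
      rw [List.eraseIdx_eq_take_drop_succ l k]
      rw [ih _ (by simp [List.length_take, List.length_drop]; omega)]
      have htl : (l.take k).length = k := by simp; omega
      rw [List.take_append_of_le_length (by omega), List.take_of_length_le (by omega)]
      rw [List.drop_append_of_le_length (by omega), List.drop_of_length_le (by omega)]
      rw [hsucc, List.filter_append]
      simp [ha]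

-- B's cut index: min of the bad positions (default len) IS the index of the first bad character
lemma pvCut_eq (cs : List Char) :
    PySem.List.minD
      (((PySem.List.enumerate cs).filter
          (fun ic => !(PySem.Chars.isalpha ic.2) && !(ic.2 == '\''))).map (·.1))
      (fun i => i) (PySem.List.len cs)
    = ((cs.findIdx pvBad : Nat) : Int) := by
  set L := ((PySem.List.enumerate cs).filter
      (fun ic => !(PySem.Chars.isalpha ic.2) && !(ic.2 == '\''))).map (·.1) with hL
  have memL : ∀ x : Int, x ∈ L ↔ ∃ k, ∃ _ : k < cs.length, pvBad cs[k] = true ∧ x = (k : Int) := by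
    intro x
    simp only [hL, List.mem_map, List.mem_filter, PySem.List.mem_enumerate_iff]
    constructor
    · rintro ⟨⟨i, c⟩, ⟨⟨k, hk, hp⟩, hbad⟩, rfl⟩
      obtain ⟨rfl, rfl⟩ : i = 0 + (k : Int) ∧ c = cs[k] := by
        constructor <;> simp_all [Prod.ext_iff]
      exact ⟨k, hk, by simpa [pvBad] using hbad, by simp⟩
    · rintro ⟨k, hk, hbad, rfl⟩
      exact ⟨((k : Int), cs[k]), ⟨⟨k, hk, by simp⟩, by simpa [pvBad] using hbad⟩, rfl⟩
  unfold PySem.List.minD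
  cases hm : PySem.List.min? L (fun i => i) with
  | none =>
    rw [PySem.List.min?_eq_none_iff] at hm
    have : cs.findIdx pvBad = cs.length := by
      rw [List.findIdx_eq_length]
      intro c hc
      by_contra hb
      obtain ⟨k, hk, rfl⟩ := List.getElem_of_mem hc
      have : ((k : Int)) ∈ L := (memL _).2 ⟨k, hk, by simp_all, rfl⟩
      simp [hm] at this
    simp [this, PySem.List.len_eq]
  | some m =>
    have hmem := PySem.List.min?_mem hm
    obtain ⟨k, hk, hbad, rfl⟩ := (memL m).1 hmem
    set j := cs.findIdx pvBad with hj
    have hjk : j ≤ k := by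
      by_contra hlt
      have hnb := List.not_of_lt_findIdx (p := pvBad) (xs := cs) (i := k) (by omega)
      exact absurd (hbad.symm.trans hnb) (by decide)
    have hjlt : j < cs.length := by omega
    have hjbad : pvBad cs[j] = true := List.findIdx_getElem (w := hjlt)
    have hjL : ((j : Int)) ∈ L := (memL _).2 ⟨j, hjlt, hjbad, rfl⟩
    have hle : ((k : Int)) ≤ (j : Int) := PySem.List.min?_isMin hm _ hjL
    simp only [Option.getD_some]
    omega

-- ===== VERDICT (by name: the statement is the Claim_ definition above) =====
theorem first_word_spec : Claim_equal_first_word := by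
  intro text _ hpre
  unfold Spec_first_word first_word first_word_alt
  cases htok : pvFindTokB (PySem.Str.split₀ text) with
  | none =>
    rw [pvTokB_eq_none] at htok
    obtain ⟨w, hw, halpha⟩ := hpre
    rw [htok w hw] at halpha
    cases halpha
  | some w =>
    rw [pvTok_rel, htok]
    simp only [Option.map_some]
    have halpha : PySem.Chars.isalpha (w.toList.headD ' ') = true := pvTokB_alpha htok
    obtain ⟨c, t, hcst⟩ : ∃ c t, w.toList = c :: t := by
      cases hcc : w.toList with
      | nil => rw [hcc] at halpha; exact absurd halpha (by decide)
      | cons c t => exact ⟨c, t, rfl⟩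
    rw [hcst]
    rw [hcst] at halpha
    have hc : PySem.Chars.isalpha c = true := by simpa using halpha
    have h2 := pvLoop2_main (c :: t) []
    simp only [List.nil_append, List.length_nil, Nat.cast_zero] at h2
    rw [h2]
    set j := (c :: t).findIdx pvBad with hj
    have h3 : pvLoop3 ((c :: t).take j) (PySem.List.enumerate ((c :: t).take j))
        = (c :: t).take j := by
      apply pvLoop3_id
      cases hjc : j with
      | zero => left; simp
      | succ n => right; exact ⟨c, t.take n, by simp, hc⟩
    rw [h3]
    have h4 := pvLoop4_aux ((c :: t).take j).length ((c :: t).take j) (le_refl _)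
    rw [PySem.List.len_eq, h4]
    simp only [List.drop_length, List.append_nil, List.take_of_length_le (le_refl _)]
    rw [pvCut_eq, ← hj, PySem.List.slice_to_natCast]
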